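-- pv_equiv track=rewrite | github.com/tu-artem/advenntofcode | day20_RegularMap.py | find_max_path
-- ===== SOURCE A (Python) =====
-- from collections import defaultdict
--
-- def find_max_path(input: str) -> int:
--     d = {
--         "N": (0, 1),
--         "S": (0, -1),
--         "W": (-1, 0),
--         "E": (1, 0)
--     }
--
--     distances = defaultdict(int)
--
--     to_check = []
--
--     px, py = x, y = 0, 0
--
--     for current in input:
--
--         if current == "(":
--             to_check.append((x,y))
--         elif current == "|":
--             x, y = to_check[-1]
--         elif current == ")":
--             x, y = to_check.pop()
--         else:
--             dx, dy = d.get(current)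
--             x += dx
--             y += dy
--             distances[(x,y)] = min(distances[(x, y)], distances[(px, py)]) if distances[(x, y)] else distances[(px, py)] + 1
--         px, py = x, y
--     return max(distances.values())
-- ===== SOURCE B (Python) =====
-- from collections import defaultdict
--
-- def find_max_path(input: str) -> int:
--     d = {"N": (0, 1), "S": (0, -1), "W": (-1, 0), "E": (1, 0)}
--
--     distances = defaultdict(int)
--
--     def walk(i: int, x: int, y: int) -> int:
--         # consume chars from index i until the matching ')' (or the end of the
--         # string); on '|' reset the position to this group's entry point.
--         ex, ey = x, y
--         while i < len(input):
--             c = input[i]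
--             i += 1
--             if c == ")":
--                 return i
--             if c == "(":
--                 i = walk(i, x, y)
--             elif c == "|":
--                 x, y = ex, ey
--             else:
--                 dx, dy = d[c]
--                 px, py = x, y
--                 x += dx
--                 y += dy
--                 distances[(x, y)] = min(distances[(x, y)], distances[(px, py)]) if distances[(x, y)] else distances[(px, py)] + 1
--         return i
--
--     walk(0, 0, 0)
--     return max(distances.values())
-- ===== Notes on version B (the rewrite author's own statement) =====
-- stated objective: alternative
-- what changed: Replaces A's flat loop with an explicit to_check stack by a recursive-descent walker over the nested parenthesis structure (recursion depth replaces the stack; '|' resets to the group's entry held in a local variable), keeping the same defaultdict distances and the same min/+1 update.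
-- outside the precondition, e.g. on find_max_path('|'): A raises IndexError, B raises ValueError; on find_max_path(')'): A raises IndexError, B raises ValueError
import Mathlib
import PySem

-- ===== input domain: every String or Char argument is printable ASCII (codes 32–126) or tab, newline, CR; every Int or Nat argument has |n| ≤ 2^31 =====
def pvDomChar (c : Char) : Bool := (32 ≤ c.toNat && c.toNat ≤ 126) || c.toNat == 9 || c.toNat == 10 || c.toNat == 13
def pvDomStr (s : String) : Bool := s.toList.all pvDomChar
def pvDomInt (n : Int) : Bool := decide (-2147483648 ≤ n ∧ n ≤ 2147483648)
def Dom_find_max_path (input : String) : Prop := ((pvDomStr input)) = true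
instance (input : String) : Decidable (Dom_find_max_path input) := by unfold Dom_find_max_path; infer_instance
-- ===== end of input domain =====

set_option maxRecDepth 8192


-- B replaces A's flat loop + explicit stack by a recursive-descent walker over the
-- nested parenthesis structure (objective: alternative decomposition, same cost).

-- ===== PORT A =====

-- the direction table d (shared literal constant of both Pythons)
def pvDirTable : PySem.Dict Char (Int × Int) :=
  PySem.Dict.ofList [('N', (0, 1)), ('S', (0, -1)), ('W', (-1, 0)), ('E', (1, 0))]

-- defaultdict(int) read: distances[k] returns the value, inserting 0 when absent
def pvDGet (d : PySem.Dict (Int × Int) Int) (k : Int × Int) :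
    Int × PySem.Dict (Int × Int) Int :=
  match d.get? k with
  | some v => (v, d)
  | none => (0, d.insert k 0)

-- loop state: (distances, to_check stack (top = cons head), (x,y), (px,py));
-- none = a raised exception (IndexError / TypeError)
def pvStepA (st : Option (PySem.Dict (Int × Int) Int × List (Int × Int) × (Int × Int) × (Int × Int)))
    (c : Char) :
    Option (PySem.Dict (Int × Int) Int × List (Int × Int) × (Int × Int) × (Int × Int)) :=
  match st with
  | none => none
  | some (dist, stk, p, pp) =>
    if c = '(' then some (dist, p :: stk, p, p)
    else if c = '|' then
      match stk with
      | [] => none            -- to_check[-1] : IndexError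
      | e :: rest => some (dist, e :: rest, e, e)
    else if c = ')' then
      match stk with
      | [] => none            -- to_check.pop() : IndexError
      | e :: rest => some (dist, rest, e, e)
    else
      match pvDirTable.get? c with
      | none => none          -- d.get(current) = None → TypeError on unpacking
      | some (dx, dy) =>
        let np : Int × Int := (p.1 + dx, p.2 + dy)
        let (cur, d1) := pvDGet dist np        -- condition distances[(x,y)]
        let (prev, d2) := pvDGet d1 pp         -- distances[(px,py)]
        let v := if cur ≠ 0 then min cur prev else prev + 1
        some (d2.insert np v, stk, np, np)

def find_max_path (input : String) : Int :=
  match input.toList.foldl pvStepA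
      (some (PySem.Dict.empty, [], ((0 : Int), (0 : Int)), ((0 : Int), (0 : Int)))) with
  | none => 0                                          -- exception path (outside Pre_)
  | some (dist, _, _, _) =>
    (PySem.List.max? dist.values (fun v => v)).getD 0  -- max([]) : ValueError (outside Pre_)

-- ===== PORT B =====

-- walk i x y: consume chars until the matching ')' (or end); returns the rest of the
-- string and the updated distances; fuel (= length+1 at the top call) only for totality
def pvWalkB (fuel : Nat) (cs : List Char) (e p : Int × Int)
    (dist : PySem.Dict (Int × Int) Int) :
    Option (List Char × PySem.Dict (Int × Int) Int) :=
  match fuel, cs with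
  | 0, cs => some (cs, dist)
  | _ + 1, [] => some ([], dist)
  | f + 1, c :: cs =>
    if c = ')' then some (cs, dist)
    else if c = '(' then
      match pvWalkB f cs p p dist with
      | none => none
      | some (rest, d1) => pvWalkB f rest e p d1
    else if c = '|' then pvWalkB f cs e e dist
    else
      match pvDirTable.get? c with
      | none => none          -- d[c] : KeyError
      | some (dx, dy) =>
        let np : Int × Int := (p.1 + dx, p.2 + dy)
        let (cur, d1) := pvDGet dist np
        let (prev, d2) := pvDGet d1 p
        let v := if cur ≠ 0 then min cur prev else prev + 1
        pvWalkB f cs e np (d2.insert np v)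

def find_max_path_alt (input : String) : Int :=
  match pvWalkB (input.toList.length + 1) input.toList ((0 : Int), (0 : Int))
      ((0 : Int), (0 : Int)) PySem.Dict.empty with
  | none => 0                                          -- exception path (outside Pre_)
  | some (_, dist) =>
    (PySem.List.max? dist.values (fun v => v)).getD 0  -- max([]) : ValueError (outside Pre_)

-- ===== PRECONDITION & SPEC =====

-- characters of the map language
def pvIsDir (c : Char) : Bool := c = 'N' || c = 'S' || c = 'W' || c = 'E'
def pvIsTok (c : Char) : Bool := pvIsDir c || c = '(' || c = '|' || c = ')'

-- Pre_ = exactly the inputs on which A returns normally: only characters NSWE(|),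
-- at least one move letter (else max([]) raises ValueError), and every '|' / ')'
-- occurs at positive parenthesis depth (else to_check[-1]/pop() raises IndexError).
def Pre_find_max_path (input : String) : Prop :=
  (∀ i < input.toList.length, pvIsTok (input.toList.getD i ' ') = true) ∧
  (∃ i < input.toList.length, pvIsDir (input.toList.getD i ' ') = true) ∧
  (∀ i < input.toList.length,
    (input.toList.getD i ' ' = ')' ∨ input.toList.getD i ' ' = '|') →
      (input.toList.take i).count ')' < (input.toList.take i).count '(')

instance (input : String) : Decidable (Pre_find_max_path input) := by
  unfold Pre_find_max_path; infer_instance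

def pvWitness_find_max_path : String := "NE(W|S)N"

def Spec_find_max_path (input : String) (out : Int) : Prop := out = find_max_path_alt input
instance (input : String) (out : Int) : Decidable (Spec_find_max_path input out) := by
  unfold Spec_find_max_path; infer_instance

-- ===== CLAIM (what is proved, stated in full; the proofs are below) =====
def Claim_equal_find_max_path : Prop := ∀ (input : String), Dom_find_max_path input → Pre_find_max_path input → Spec_find_max_path input (find_max_path input)


-- ===== LEMMAS AND PROOFS =====

-- project out the distances dict (all that the final answer depends on)
def pvD (st : Option (PySem.Dict (Int × Int) Int × List (Int × Int) × (Int × Int) × (Int × Int))) :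
    Option (PySem.Dict (Int × Int) Int) := st.map (·.1)

-- '|' and ')' are depth-safe: positive relative depth throughout
def pvSafe : List Char → Nat → Prop
  | [], _ => True
  | c :: cs, k =>
    if c = '(' then pvSafe cs (k + 1)
    else if c = '|' then 0 < k ∧ pvSafe cs k
    else if c = ')' then 0 < k ∧ pvSafe cs (k - 1)
    else pvSafe cs k

lemma pvFoldA_none : ∀ cs : List Char, cs.foldl pvStepA none = none := by
  intro cs; induction cs with
  | nil => rfl
  | cons c cs ih => simpa [pvStepA] using ih

lemma pvPre_safe : ∀ (cs : List Char) (k : Nat),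
    (∀ i < cs.length, (cs.getD i ' ' = ')' ∨ cs.getD i ' ' = '|') →
      (cs.take i).count ')' < (cs.take i).count '(' + k) → pvSafe cs k := by
  intro cs
  induction cs with
  | nil => intro k h; trivial
  | cons c cs ih =>
    intro k h
    have hshift : ∀ i < cs.length, (cs.getD i ' ' = ')' ∨ cs.getD i ' ' = '|') →
        (cs.take i).count ')' + (if c = ')' then 1 else 0) <
          (cs.take i).count '(' + (if c = '(' then 1 else 0) + k := by
      intro i hi hci
      have := h (i + 1) (by simp; omega) (by simpa using hci)
      simpa [List.count_cons] using this
    by_cases hc2 : c = '('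
    · simp only [pvSafe, hc2, reduceIte]
      exact ih (k + 1) (by intro i hi hci; have := hshift i hi hci; simp [hc2] at this; omega)
    · by_cases hc3 : c = '|'
      · have hk : 0 < k := by
          have := h 0 (by simp) (by simp [hc3])
          simpa using this
        simp only [pvSafe, hc3, reduceIte]
        exact ⟨hk, ih k (by intro i hi hci; have := hshift i hi hci; simp [hc3] at this; omega)⟩
      · by_cases hc1 : c = ')'
        · have hk : 0 < k := by
            have := h 0 (by simp) (by simp [hc1])
            simpa using this
          simp only [pvSafe, hc1, reduceIte]
          refine ⟨hk, ih (k - 1) ?_⟩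
          intro i hi hci
          have := hshift i hi hci
          simp [hc1] at this
          omega
        · simp only [pvSafe, hc1, hc2, hc3, reduceIte]
          exact ih k (by intro i hi hci; have := hshift i hi hci; simp [hc1, hc2] at this; omega)

lemma pvWalkB_rest : ∀ (f : Nat) (cs : List Char) e p dist rest d', cs.length < f →
    pvWalkB f cs e p dist = some (rest, d') → rest = [] ∨ rest.length < cs.length := by
  intro f
  induction f with
  | zero => intro cs e p dist rest d' h; omega
  | succ f ih =>
    intro cs e p dist rest d' hlen hw
    cases cs with
    | nil =>
      simp only [pvWalkB, Option.some.injEq, Prod.mk.injEq] at hw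
      exact Or.inl hw.1.symm
    | cons c cs =>
      simp only [pvWalkB] at hw
      by_cases hc1 : c = ')'
      · simp only [hc1, reduceIte, Option.some.injEq, Prod.mk.injEq] at hw
        right; rw [← hw.1]; simp
      · by_cases hc2 : c = '('
        · simp only [hc2, reduceIte] at hw
          rcases hinner : pvWalkB f cs p p dist with _ | ⟨r1, d1⟩
          · rw [hinner] at hw; simp at hw
          · rw [hinner] at hw
            have hcs : cs.length < f := by simp at hlen; omega
            have h1 := ih cs p p dist r1 d1 hcs hinner
            rcases h1 with h1 | h1
            · subst h1
              cases f with
              | zero => omega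
              | succ f' =>
                simp [pvWalkB] at hw
                exact Or.inl hw.1
            · have h2 := ih r1 e p d1 rest d' (by omega) hw
              rcases h2 with h2 | h2
              · exact Or.inl h2
              · right; simp; omega
        · by_cases hc3 : c = '|'
          · simp only [hc3, reduceIte] at hw
            have h1 := ih cs e e dist rest d' (by simp at hlen; omega) hw
            rcases h1 with h1 | h1
            · exact Or.inl h1
            · right; simp; omega
          · simp only [hc1, hc2, hc3, reduceIte] at hw
            rcases hdir : pvDirTable.get? c with _ | ⟨dx, dy⟩
            · rw [hdir] at hw; simp at hw
            · rw [hdir] at hw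
              simp only at hw
              have h1 := ih cs e _ _ rest d' (by simp at hlen; omega) hw
              rcases h1 with h1 | h1
              · exact Or.inl h1
              · right; simp; omega

lemma pvWalkB_safe : ∀ (f : Nat) (cs : List Char) (k : Nat) e p dist rest d',
    cs.length < f → pvSafe cs (k + 1) →
    pvWalkB f cs e p dist = some (rest, d') → pvSafe rest k := by
  intro f
  induction f with
  | zero => intro cs k e p dist rest d' h; omega
  | succ f ih =>
    intro cs k e p dist rest d' hlen hsafe hw
    cases cs with
    | nil =>
      simp only [pvWalkB, Option.some.injEq, Prod.mk.injEq] at hw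
      rw [← hw.1]; trivial
    | cons c cs =>
      simp only [pvWalkB] at hw
      by_cases hc1 : c = ')'
      · simp only [hc1, reduceIte, Option.some.injEq, Prod.mk.injEq] at hw
        rw [← hw.1]
        simp only [pvSafe, hc1, reduceIte] at hsafe
        simpa using hsafe.2
      · by_cases hc2 : c = '('
        · simp only [hc2, reduceIte] at hw
          simp only [pvSafe, hc2, reduceIte] at hsafe
          rcases hinner : pvWalkB f cs p p dist with _ | ⟨r1, d1⟩
          · rw [hinner] at hw; simp at hw
          · rw [hinner] at hw
            have hcs : cs.length < f := by simp at hlen; omega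
            have hs1 : pvSafe r1 (k + 1) := ih cs (k + 1) p p dist r1 d1 hcs hsafe hinner
            have hr1 := pvWalkB_rest f cs p p dist r1 d1 hcs hinner
            have hr1len : r1.length < f := by
              rcases hr1 with h | h
              · subst h; simp; omega
              · omega
            exact ih r1 k e p d1 rest d' hr1len hs1 hw
        · by_cases hc3 : c = '|'
          · simp only [hc3, reduceIte] at hw
            simp only [pvSafe, hc3, reduceIte] at hsafe
            exact ih cs k e e dist rest d' (by simp at hlen; omega) hsafe.2 hw
          · simp only [hc1, hc2, hc3, reduceIte] at hw
            simp only [pvSafe, hc1, hc2, hc3, reduceIte] at hsafe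
            rcases hdir : pvDirTable.get? c with _ | ⟨dx, dy⟩
            · rw [hdir] at hw; simp at hw
            · rw [hdir] at hw
              simp only at hw
              exact ih cs k e _ _ rest d' (by simp at hlen; omega) hsafe hw

lemma pvGroup : ∀ (f : Nat) (cs : List Char) dist stk ex x, cs.length < f →
    pvD (cs.foldl pvStepA (some (dist, ex :: stk, x, x))) =
      (match pvWalkB f cs ex x dist with
       | none => none
       | some (rest, d') => pvD (rest.foldl pvStepA (some (d', stk, ex, ex)))) := by
  intro f
  induction f with
  | zero => intro cs dist stk ex x h; omega
  | succ f ih =>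
    intro cs dist stk ex x hlen
    cases cs with
    | nil => simp [pvWalkB, pvD]
    | cons c cs =>
      rw [List.foldl_cons]
      by_cases hc1 : c = ')'
      · conv_rhs => rw [pvWalkB]
        simp [pvStepA, hc1, pvD]
      · by_cases hc2 : c = '('
        · have hstep : pvStepA (some (dist, ex :: stk, x, x)) c =
              some (dist, x :: ex :: stk, x, x) := by simp [pvStepA, hc2]
          rw [hstep]
          have hcs : cs.length < f := by simp at hlen; omega
          rw [ih cs dist (ex :: stk) x x hcs]
          conv_rhs => rw [pvWalkB]
          simp only [hc2, reduceIte]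
          rcases hinner : pvWalkB f cs x x dist with _ | ⟨r1, d1⟩
          · simp
          · simp only
            have hr1 := pvWalkB_rest f cs x x dist r1 d1 hcs hinner
            have hr1len : r1.length < f := by
              rcases hr1 with h | h
              · subst h; simp; omega
              · omega
            exact ih r1 d1 stk ex x hr1len
        · by_cases hc3 : c = '|'
          · have hstep : pvStepA (some (dist, ex :: stk, x, x)) c =
                some (dist, ex :: stk, ex, ex) := by simp [pvStepA, hc3]
            rw [hstep]
            have hcs : cs.length < f := by simp at hlen; omega
            rw [ih cs dist stk ex ex hcs]
            conv_rhs => rw [pvWalkB]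
            simp [hc3]
          · rcases hdir : pvDirTable.get? c with _ | ⟨dx, dy⟩
            · have hstep : pvStepA (some (dist, ex :: stk, x, x)) c = none := by
                simp [pvStepA, hc1, hc2, hc3, hdir]
              rw [hstep, pvFoldA_none]
              conv_rhs => rw [pvWalkB]
              simp [hc1, hc2, hc3, hdir, pvD]
            · have hstep : pvStepA (some (dist, ex :: stk, x, x)) c =
                  some (((pvDGet (pvDGet dist (x.1 + dx, x.2 + dy)).2 x).2.insert
                      (x.1 + dx, x.2 + dy)
                      (if (pvDGet dist (x.1 + dx, x.2 + dy)).1 ≠ 0 then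
                        min (pvDGet dist (x.1 + dx, x.2 + dy)).1
                          (pvDGet (pvDGet dist (x.1 + dx, x.2 + dy)).2 x).1
                      else (pvDGet (pvDGet dist (x.1 + dx, x.2 + dy)).2 x).1 + 1)),
                    ex :: stk, (x.1 + dx, x.2 + dy), (x.1 + dx, x.2 + dy)) := by
                simp [pvStepA, hc1, hc2, hc3, hdir]
              rw [hstep]
              have hcs : cs.length < f := by simp at hlen; omega
              rw [ih cs _ stk ex _ hcs]
              conv_rhs => rw [pvWalkB]
              simp only [hc1, hc2, hc3, hdir, reduceIte]

lemma pvTop : ∀ (f : Nat) (cs : List Char) dist x e, cs.length < f → pvSafe cs 0 →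
    pvD (cs.foldl pvStepA (some (dist, [], x, x))) =
      (pvWalkB f cs e x dist).map (fun r => r.2) := by
  intro f
  induction f with
  | zero => intro cs dist x e h; omega
  | succ f ih =>
    intro cs dist x e hlen hsafe
    cases cs with
    | nil => simp [pvWalkB, pvD]
    | cons c cs =>
      rw [List.foldl_cons]
      by_cases hc1 : c = ')'
      · simp only [pvSafe, hc1, reduceIte] at hsafe
        exact absurd hsafe.1 (Nat.lt_irrefl 0)
      · by_cases hc2 : c = '('
        · simp only [pvSafe, hc2, reduceIte] at hsafe
          have hstep : pvStepA (some (dist, [], x, x)) c =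
              some (dist, [x], x, x) := by simp [pvStepA, hc2]
          rw [hstep]
          have hcs : cs.length < f := by simp at hlen; omega
          rw [pvGroup f cs dist [] x x hcs]
          conv_rhs => rw [pvWalkB]
          simp only [hc2, reduceIte]
          rcases hinner : pvWalkB f cs x x dist with _ | ⟨r1, d1⟩
          · simp
          · simp only
            have hr1 := pvWalkB_rest f cs x x dist r1 d1 hcs hinner
            have hr1len : r1.length < f := by
              rcases hr1 with h | h
              · subst h; simp; omega
              · omega
            have hs1 : pvSafe r1 0 := pvWalkB_safe f cs 0 x x dist r1 d1 hcs hsafe hinner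
            exact ih r1 d1 x e hr1len hs1
        · by_cases hc3 : c = '|'
          · simp only [pvSafe, hc3, reduceIte] at hsafe
            exact absurd hsafe.1 (Nat.lt_irrefl 0)
          · simp only [pvSafe, hc3, hc2, hc1, reduceIte] at hsafe
            rcases hdir : pvDirTable.get? c with _ | ⟨dx, dy⟩
            · have hstep : pvStepA (some (dist, [], x, x)) c = none := by
                simp [pvStepA, hc1, hc2, hc3, hdir]
              rw [hstep, pvFoldA_none]
              conv_rhs => rw [pvWalkB]
              simp [hc1, hc2, hc3, hdir, pvD]
            · have hstep : pvStepA (some (dist, [], x, x)) c =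
                  some (((pvDGet (pvDGet dist (x.1 + dx, x.2 + dy)).2 x).2.insert
                      (x.1 + dx, x.2 + dy)
                      (if (pvDGet dist (x.1 + dx, x.2 + dy)).1 ≠ 0 then
                        min (pvDGet dist (x.1 + dx, x.2 + dy)).1
                          (pvDGet (pvDGet dist (x.1 + dx, x.2 + dy)).2 x).1
                      else (pvDGet (pvDGet dist (x.1 + dx, x.2 + dy)).2 x).1 + 1)),
                    [], (x.1 + dx, x.2 + dy), (x.1 + dx, x.2 + dy)) := by
                simp [pvStepA, hc1, hc2, hc3, hdir]
              rw [hstep]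
              have hcs : cs.length < f := by simp at hlen; omega
              rw [ih cs _ _ e hcs hsafe]
              conv_rhs => rw [pvWalkB]
              simp only [hc1, hc2, hc3, hdir, reduceIte]

-- ===== VERDICT (by name: the statement is the Claim_ definition above) =====
theorem find_max_path_spec : Claim_equal_find_max_path := by
  intro input hdom hpre
  unfold Spec_find_max_path
  obtain ⟨hvalid, hmove, hbal⟩ := hpre
  have hsafe : pvSafe input.toList 0 :=
    pvPre_safe input.toList 0 (by intro i hi hci; have := hbal i hi hci; omega)
  have h := pvTop (input.toList.length + 1) input.toList PySem.Dict.empty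
      ((0 : Int), (0 : Int)) ((0 : Int), (0 : Int)) (by omega) hsafe
  unfold find_max_path find_max_path_alt
  rcases hw : pvWalkB (input.toList.length + 1) input.toList ((0 : Int), (0 : Int))
      ((0 : Int), (0 : Int)) PySem.Dict.empty with _ | ⟨rest, d⟩ <;> rw [hw] at h
  · have hF : input.toList.foldl pvStepA
        (some (PySem.Dict.empty, [], ((0 : Int), (0 : Int)), ((0 : Int), (0 : Int)))) = none := by
      rcases hF' : input.toList.foldl pvStepA
          (some (PySem.Dict.empty, [], ((0 : Int), (0 : Int)), ((0 : Int), (0 : Int)))) with _ | st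
      · rfl
      · rw [hF'] at h; simp [pvD] at h
    rw [hF]
  · rcases hF' : input.toList.foldl pvStepA
        (some (PySem.Dict.empty, [], ((0 : Int), (0 : Int)), ((0 : Int), (0 : Int)))) with _ | st
    · rw [hF'] at h; simp [pvD] at h
    · rw [hF'] at h
      simp only [pvD, Option.map_some, Option.some.injEq] at h
      obtain ⟨d0, stk0, p0, pp0⟩ := st
      simp only at h
      rw [h]
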